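-- pv_equiv track=rewrite | github.com/sanskrit-lexicon/CAE | english_corrections/make_error1.py | entry_Cflines
-- ===== SOURCE A (Python) =====
-- def entry_Cflines(lines):
--  ans = []
--  found = False
--  for idx,line in enumerate(lines):
--   # there 700+ lower case 'cf.'
--   # For this analysis, we capitalize
--   line = line.replace(' cf.',' Cf.')
--   # Similarly, add space
--   line = line.replace('>cf.','> Cf.')
--   line = line.replace('>Cf.','> Cf.')
--   if ' Cf.' in line:
--    found = True
--   if found:
--    ans.append(line)
--  return ans
-- ===== SOURCE B (Python) =====
-- def entry_Cflines(lines):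
--     def fix(line):
--         return (line.replace(' cf.', ' Cf.')
--                     .replace('>cf.', '> Cf.')
--                     .replace('>Cf.', '> Cf.'))
--     # Back-to-front pass: a line belongs to the answer iff some line at or
--     # before it (transformed) contains ' Cf.'.  Walk from the end, buffering
--     # transformed lines in `pending`; every time a marker line is reached,
--     # everything buffered so far is confirmed into the answer.
--     ans_rev = []   # confirmed answer, in reverse order
--     pending = []   # transformed lines awaiting a marker further left, reversed
--     for line in reversed(lines):
--         t = fix(line)
--         pending.append(t)
--         if ' Cf.' in t:
--             ans_rev.extend(pending)
--             pending = []
--     ans_rev.reverse()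
--     return ans_rev
-- ===== Notes on version B (the rewrite author's own statement) =====
-- stated objective: alternative
-- what changed: Replaces A's forward flag-latched scan by a back-to-front pass with a flush buffer: lines are buffered in reverse and confirmed into the answer whenever a marker line is reached, so no boolean flag, index search or slice is needed.
import Mathlib
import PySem

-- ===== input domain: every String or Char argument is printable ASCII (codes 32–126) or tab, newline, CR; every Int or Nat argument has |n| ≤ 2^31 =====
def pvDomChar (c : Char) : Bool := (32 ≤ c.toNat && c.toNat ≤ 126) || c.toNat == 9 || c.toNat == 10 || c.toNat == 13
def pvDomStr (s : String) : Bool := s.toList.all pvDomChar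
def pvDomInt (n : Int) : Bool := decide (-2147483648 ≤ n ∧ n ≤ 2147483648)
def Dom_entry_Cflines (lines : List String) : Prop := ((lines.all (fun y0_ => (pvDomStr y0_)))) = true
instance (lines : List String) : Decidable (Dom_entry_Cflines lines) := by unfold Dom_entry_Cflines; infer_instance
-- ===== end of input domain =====

-- B replaces A's forward flag-latched scan by a back-to-front pass with a flush
-- buffer (pending lines confirmed when a marker is reached); objective: alternative.

-- ===== PORT A =====
def entry_Cflines (lines : List String) : List String :=
  let st := (PySem.List.enumerate lines).foldl
    (fun (st : List String × Bool) p =>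
      let ans := st.1
      let found := st.2
      let line := PySem.Str.replace p.2 " cf." " Cf."
      let line := PySem.Str.replace line ">cf." "> Cf."
      let line := PySem.Str.replace line ">Cf." "> Cf."
      let found := if PySem.Str.isIn " Cf." line then true else found
      if found then (ans ++ [line], found) else (ans, found))
    ([], false)
  st.1

-- ===== PORT B =====
def pvFixB (line : String) : String :=
  PySem.Str.replace (PySem.Str.replace (PySem.Str.replace line " cf." " Cf.") ">cf." "> Cf.") ">Cf." "> Cf."

def pvStepB (st : List String × List String) (line : String) : List String × List String :=
  let t := pvFixB line
  let pending := st.2 ++ [t]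
  if PySem.Str.isIn " Cf." t then (st.1 ++ pending, []) else (st.1, pending)

def entry_Cflines_alt (lines : List String) : List String :=
  let st := lines.reverse.foldl pvStepB ([], [])
  st.1.reverse

-- ===== PRECONDITION & SPEC =====
def Spec_entry_Cflines (lines : List String) (out : List String) : Prop := out = entry_Cflines_alt lines
instance (lines : List String) (out : List String) : Decidable (Spec_entry_Cflines lines out) := by unfold Spec_entry_Cflines; infer_instance

-- ===== CLAIM (what is proved, stated in full; the proofs are below) =====
def Claim_equal_entry_Cflines : Prop := ∀ (lines : List String), Dom_entry_Cflines lines → Spec_entry_Cflines lines (entry_Cflines lines)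

-- ===== LEMMAS AND PROOFS =====

def pvNm (l : String) : Bool := !(PySem.Str.isIn " Cf." l)

def pvAStep (st : List String × Bool) (p : Int × String) : List String × Bool :=
  let ans := st.1
  let found := st.2
  let line := PySem.Str.replace p.2 " cf." " Cf."
  let line := PySem.Str.replace line ">cf." "> Cf."
  let line := PySem.Str.replace line ">Cf." "> Cf."
  let found := if PySem.Str.isIn " Cf." line then true else found
  if found then (ans ++ [line], found) else (ans, found)

theorem entry_Cflines_eq_fold (lines : List String) :
    entry_Cflines lines = ((PySem.List.enumerate lines).foldl pvAStep ([], false)).1 := rfl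

theorem pvAStep_char (ans : List String) (found : Bool) (p : Int × String) :
    pvAStep (ans, found) p =
      if PySem.Str.isIn " Cf." (pvFixB p.2) then (ans ++ [pvFixB p.2], true)
      else if found then (ans ++ [pvFixB p.2], true) else (ans, false) := by
  show (if (if PySem.Str.isIn " Cf." (pvFixB p.2) then true else found)
        then (ans ++ [pvFixB p.2], if PySem.Str.isIn " Cf." (pvFixB p.2) then true else found)
        else (ans, if PySem.Str.isIn " Cf." (pvFixB p.2) then true else found)) = _
  cases PySem.Str.isIn " Cf." (pvFixB p.2) <;> cases found <;> rfl

-- characterisation of A's fold: once found, everything is appended; before that, dropWhile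
theorem pvFold_char (ps : List (Int × String)) (ans : List String) (found : Bool) :
    (ps.foldl pvAStep (ans, found)).1 =
      if found then ans ++ ps.map (fun p => pvFixB p.2)
      else ans ++ (ps.map (fun p => pvFixB p.2)).dropWhile pvNm := by
  induction ps generalizing ans found with
  | nil => cases found <;> simp
  | cons p ps ih =>
    rw [List.foldl_cons, pvAStep_char, List.map_cons]
    cases h : PySem.Str.isIn " Cf." (pvFixB p.2) with
    | true =>
      rw [if_pos rfl, ih]
      have hd : List.dropWhile pvNm (pvFixB p.2 :: ps.map (fun p => pvFixB p.2)) =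
          pvFixB p.2 :: ps.map (fun p => pvFixB p.2) := by
        rw [List.dropWhile_cons]; simp only [pvNm, h]; rfl
      cases found with
      | true => simp
      | false => rw [hd]; simp
    | false =>
      rw [if_neg (by simp)]
      have hd : List.dropWhile pvNm (pvFixB p.2 :: ps.map (fun p => pvFixB p.2)) =
          List.dropWhile pvNm (ps.map (fun p => pvFixB p.2)) := by
        rw [List.dropWhile_cons]; simp only [pvNm, h]; rfl
      cases found with
      | true => rw [if_pos rfl, ih]; simp
      | false => rw [if_neg (by simp), ih, hd]; simp

theorem pvMap_enum (lines : List String) :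
    (PySem.List.enumerate lines).map (fun p => pvFixB p.2) = lines.map pvFixB := by
  conv_rhs => rw [← PySem.List.map_snd_enumerate (xs := lines) (s := 0)]
  rw [List.map_map]
  rfl

-- characterisation of B's reverse fold: confirmed part = everything up to the
-- last marker of the processed stream (pending must be marker-free)
theorem pvStepB_eq (a p : List String) (line : String) :
    pvStepB (a, p) line =
      if PySem.Str.isIn " Cf." (pvFixB line) then (a ++ (p ++ [pvFixB line]), [])
      else (a, p ++ [pvFixB line]) := rfl

theorem pvBfold_char (rs : List String) (a p : List String)
    (hp : ∀ x ∈ p, pvNm x = true) :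
    (rs.foldl pvStepB (a, p)).1 =
      a ++ (((p ++ rs.map pvFixB).reverse.dropWhile pvNm).reverse) := by
  induction rs generalizing a p with
  | nil =>
    have : List.dropWhile pvNm p.reverse = [] := by
      rw [List.dropWhile_eq_nil_iff]
      intro x hx; exact hp x (List.mem_reverse.mp hx)
    simp [this]
  | cons r rs ih =>
    rw [List.foldl_cons, pvStepB_eq]
    cases h : PySem.Str.isIn " Cf." (pvFixB r) with
    | true =>
      rw [if_pos rfl]
      rw [ih (a ++ (p ++ [pvFixB r])) [] (by intro x hx; simp at hx)]
      have hnt : pvNm (pvFixB r) = false := by unfold pvNm; rw [h]; rfl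
      have key : List.dropWhile pvNm ((p ++ pvFixB r :: rs.map pvFixB).reverse) =
          List.dropWhile pvNm ((rs.map pvFixB).reverse) ++ (pvFixB r :: p.reverse) := by
        rw [show (p ++ pvFixB r :: rs.map pvFixB).reverse
              = (rs.map pvFixB).reverse ++ (pvFixB r :: p.reverse) by simp]
        rw [List.dropWhile_append]
        split
        · next he =>
          rw [List.isEmpty_iff] at he
          rw [he, List.dropWhile_cons, hnt]
          simp
        · rfl
      rw [List.map_cons, key]
      simp
    | false =>
      rw [if_neg (by simp)]
      have hnt : pvNm (pvFixB r) = true := by unfold pvNm; rw [h]; rfl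
      rw [ih a (p ++ [pvFixB r]) (by
        intro x hx
        rcases List.mem_append.mp hx with h1 | h1
        · exact hp x h1
        · simp at h1; subst h1; exact hnt)]
      simp

theorem pvBalt_eq (lines : List String) :
    entry_Cflines_alt lines = (lines.map pvFixB).dropWhile pvNm := by
  show (List.foldl pvStepB ([], []) lines.reverse).1.reverse = _
  rw [pvBfold_char lines.reverse [] [] (by intro x hx; simp at hx)]
  simp [List.map_reverse]

-- ===== VERDICT (by name: the statement is the Claim_ definition above) =====
theorem entry_Cflines_spec : Claim_equal_entry_Cflines := by
  intro lines _
  show entry_Cflines lines = entry_Cflines_alt lines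
  rw [entry_Cflines_eq_fold, pvFold_char, pvBalt_eq, pvMap_enum]
  simp
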